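-- pv_equiv track=rewrite | github.com/CSCfi/fairdata-ida | utils/admin/lib/audit-project.py | get_newest_timestamp
-- ===== SOURCE A (Python) =====
-- def get_newest_timestamp(node):
--     newest_timestamp = None
--     for context in [ 'filesystem', 'nextcloud', 'ida', 'metax' ]:
--         context_details = node.get(context)
--         if context_details:
--             node_modified = context_details.get('modified')
--             node_uploaded = context_details.get('uploaded')
--             node_frozen = context_details.get('frozen')
--             if node_modified and (newest_timestamp == None or node_modified > newest_timestamp):
--                 newest_timestamp = node_modified
--             if node_uploaded and (newest_timestamp == None or node_uploaded > newest_timestamp):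
--                 newest_timestamp = node_uploaded
--             if node_frozen and (newest_timestamp == None or node_frozen > newest_timestamp):
--                 newest_timestamp = node_frozen
--     return newest_timestamp
-- ===== SOURCE B (Python) =====
-- _CONTEXTS = {'filesystem', 'nextcloud', 'ida', 'metax'}
-- _TS_KEYS = {'modified', 'uploaded', 'frozen'}
--
-- def get_newest_timestamp(node):
--     ordered = sorted(
--         value
--         for context, details in node.items()
--         if context in _CONTEXTS
--         for key, value in details.items()
--         if key in _TS_KEYS and value
--     )
--     return ordered[-1] if ordered else None
-- ===== Notes on version B (the rewrite author's own statement) =====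
-- stated objective: alternative
-- what changed: B traverses the node's own items (filtering contexts and timestamp keys by set membership) instead of probing the four fixed contexts and three fixed keys with .get, and sorts the gathered timestamps and returns the last instead of maintaining a running max through nested conditionals. Pre_ only excludes association lists with duplicate keys, which never arise from Python dicts.
import Mathlib
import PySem

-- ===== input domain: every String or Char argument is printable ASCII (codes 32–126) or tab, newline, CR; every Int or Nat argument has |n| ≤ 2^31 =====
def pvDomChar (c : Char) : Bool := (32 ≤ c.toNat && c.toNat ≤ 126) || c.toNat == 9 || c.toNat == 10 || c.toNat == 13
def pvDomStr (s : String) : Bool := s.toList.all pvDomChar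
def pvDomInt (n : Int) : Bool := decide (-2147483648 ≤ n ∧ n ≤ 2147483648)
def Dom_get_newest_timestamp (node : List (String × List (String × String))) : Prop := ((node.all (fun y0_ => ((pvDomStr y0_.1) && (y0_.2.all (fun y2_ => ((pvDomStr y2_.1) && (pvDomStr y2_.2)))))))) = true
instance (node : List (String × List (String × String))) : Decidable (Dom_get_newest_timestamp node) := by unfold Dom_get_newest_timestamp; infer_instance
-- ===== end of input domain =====

-- B traverses the node's own items (set-membership filters on contexts and timestamp keys)
-- and sorts the gathered timestamps, returning the last, instead of A's probing of fixed keys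
-- with .get and a running max through nested conditionals; objective: alternative.
-- Equivalence is about the RETURN value; neither program mutates its argument.

-- ===== PORT A =====
-- 'if v and (newest == None or v > newest): newest = v' — one conditional update of A's loop
def pvConsider (cur : Option String) (v : Option String) : Option String :=
  match v with
  | none => cur
  | some s =>
    if s = "" then cur
    else
      match cur with
      | none => some s
      | some c => if c < s then some s else cur

def get_newest_timestamp (node : List (String × List (String × String))) : Option String :=
  ["filesystem", "nextcloud", "ida", "metax"].foldl
    (fun newest_timestamp context =>
      match node.lookup context with
      | none => newest_timestamp
      | some context_details =>
        if context_details.isEmpty then newest_timestamp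
        else
          let node_modified := context_details.lookup "modified"
          let node_uploaded := context_details.lookup "uploaded"
          let node_frozen := context_details.lookup "frozen"
          pvConsider (pvConsider (pvConsider newest_timestamp node_modified) node_uploaded) node_frozen)
    none

-- ===== PORT B =====
-- B's module-level set constants (distinct string literals; membership = List.contains)
def pvCtxs : List String := ["filesystem", "nextcloud", "ida", "metax"]
def pvTsKeys : List String := ["modified", "uploaded", "frozen"]

def get_newest_timestamp_alt (node : List (String × List (String × String))) : Option String :=
  let ordered := PySem.List.sorted
    (node.flatMap (fun p =>
      if pvCtxs.contains p.1 then
        p.2.filterMap (fun q => if pvTsKeys.contains q.1 && !(q.2 == "") then some q.2 else none)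
      else []))
    (fun x => x) false
  if ordered.isEmpty then none else PySem.List.pyGet? ordered (-1)

-- ===== PRECONDITION & SPEC =====
-- Pre_ excludes association lists with duplicate keys (in the node or in a context's details):
-- such lists never arise from a Python dict, and on them A's first-match .get and B's full
-- iteration over items() would read different entries.
def Pre_get_newest_timestamp (node : List (String × List (String × String))) : Prop :=
  (node.map Prod.fst).Nodup ∧ ∀ p ∈ node, (p.2.map Prod.fst).Nodup
instance (node : List (String × List (String × String))) : Decidable (Pre_get_newest_timestamp node) := by unfold Pre_get_newest_timestamp; infer_instance

def pvWitness_get_newest_timestamp : (List (String × List (String × String))) :=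
  [("ida", [("modified", "2020-01-01"), ("frozen", "2021-02-02")]), ("other", [])]

def Spec_get_newest_timestamp (node : List (String × List (String × String))) (out : Option String) : Prop := out = get_newest_timestamp_alt node
instance (node : List (String × List (String × String))) (out : Option String) : Decidable (Spec_get_newest_timestamp node out) := by unfold Spec_get_newest_timestamp; infer_instance

-- ===== CLAIM (what is proved, stated in full; the proofs are below) =====
def Claim_equal_get_newest_timestamp : Prop := ∀ (node : List (String × List (String × String))), Dom_get_newest_timestamp node → Pre_get_newest_timestamp node → Spec_get_newest_timestamp node (get_newest_timestamp node)

-- ===== LEMMAS AND PROOFS =====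

-- the running-max step 'newest = v if v > newest' on an already-truthy value
def pvStep (cur : Option String) (s : String) : Option String :=
  match cur with
  | none => some s
  | some m => if m < s then some s else some m

-- the (0- or 1-element) candidate list one details.get(key) contributes
def pvOptCand (v : Option String) : List String :=
  match v with
  | none => []
  | some s => if s = "" then [] else [s]

-- the candidate list one context's details contribute, in A's probe order
def pvCandsOf (d : List (String × String)) : List String :=
  pvOptCand (d.lookup "modified") ++ pvOptCand (d.lookup "uploaded") ++ pvOptCand (d.lookup "frozen")

-- the candidate list one context contributes in A
def pvCtx (node : List (String × List (String × String))) (c : String) : List String :=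
  match node.lookup c with
  | none => []
  | some d => if d.isEmpty then [] else pvCandsOf d

def pvCandsA (node : List (String × List (String × String))) : List String :=
  pvCtxs.flatMap (pvCtx node)

def pvCandsB (node : List (String × List (String × String))) : List String :=
  node.flatMap (fun p =>
    if pvCtxs.contains p.1 then
      p.2.filterMap (fun q => if pvTsKeys.contains q.1 && !(q.2 == "") then some q.2 else none)
    else [])

theorem pvConsider_eq (cur : Option String) (v : Option String) :
    pvConsider cur v = (pvOptCand v).foldl pvStep cur := by
  cases v with
  | none => rfl
  | some s =>
    by_cases h : s = "" <;> cases cur <;> simp [pvConsider, pvOptCand, pvStep, h, List.foldl]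

theorem pvCtx_step (node : List (String × List (String × String))) (c : String)
    (newest : Option String) :
    (match node.lookup c with
      | none => newest
      | some context_details =>
        if context_details.isEmpty then newest
        else
          pvConsider (pvConsider (pvConsider newest (context_details.lookup "modified"))
            (context_details.lookup "uploaded")) (context_details.lookup "frozen"))
    = (pvCtx node c).foldl pvStep newest := by
  cases h : node.lookup c with
  | none => simp [pvCtx, h]
  | some d =>
    by_cases he : d.isEmpty
    · simp [pvCtx, h, he]
    · simp only [pvCtx, h, he, if_neg, Bool.not_eq_true, pvCandsOf, List.foldl_append,
        pvConsider_eq]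

theorem pvA_eq (node : List (String × List (String × String))) :
    get_newest_timestamp node = (pvCandsA node).foldl pvStep none := by
  simp only [get_newest_timestamp, pvCandsA, pvCtxs, List.foldl_cons, List.foldl_nil,
    List.flatMap_cons, List.flatMap_nil, List.append_nil, List.foldl_append]
  rw [pvCtx_step, pvCtx_step, pvCtx_step, pvCtx_step]

-- fold with a some-accumulator: the result is a max of the accumulator and the list
theorem pvFold_some (l : List String) : ∀ (m : String),
    ∃ r, l.foldl pvStep (some m) = some r ∧ (r = m ∨ r ∈ l) ∧ m ≤ r ∧ ∀ x ∈ l, x ≤ r := by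
  induction l with
  | nil => intro m; exact ⟨m, rfl, Or.inl rfl, le_refl m, by simp⟩
  | cons y t ih =>
    intro m
    by_cases h : m < y
    · obtain ⟨r, hr, hmem, hle, hub⟩ := ih y
      refine ⟨r, ?_, ?_, le_of_lt (lt_of_lt_of_le h hle), ?_⟩
      · simpa [pvStep, h] using hr
      · rcases hmem with h' | h' <;> simp [h']
      · intro x hx
        rcases List.mem_cons.mp hx with h' | h'
        · exact h' ▸ hle
        · exact hub x h'
    · obtain ⟨r, hr, hmem, hle, hub⟩ := ih m
      refine ⟨r, ?_, ?_, hle, ?_⟩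
      · simpa [pvStep, h] using hr
      · rcases hmem with h' | h' <;> simp [h']
      · intro x hx
        rcases List.mem_cons.mp hx with h' | h'
        · exact h' ▸ le_trans (le_of_not_gt h) hle
        · exact hub x h'

-- the running max depends only on the SET of candidates
theorem pvFold_mem_congr (l₁ l₂ : List String) (h : ∀ x, x ∈ l₁ ↔ x ∈ l₂) :
    l₁.foldl pvStep none = l₂.foldl pvStep none := by
  cases l₁ with
  | nil =>
    cases l₂ with
    | nil => rfl
    | cons y t => exact absurd ((h y).mpr (List.mem_cons_self)) (by simp)
  | cons y₁ t₁ =>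
    cases l₂ with
    | nil => exact absurd ((h y₁).mp (List.mem_cons_self)) (by simp)
    | cons y₂ t₂ =>
      obtain ⟨r₁, hr₁, hmem₁, hle₁, hub₁⟩ := pvFold_some t₁ y₁
      obtain ⟨r₂, hr₂, hmem₂, hle₂, hub₂⟩ := pvFold_some t₂ y₂
      have hin₁ : r₁ ∈ y₂ :: t₂ := (h r₁).mp (by rcases hmem₁ with h' | h' <;> simp [h'])
      have hin₂ : r₂ ∈ y₁ :: t₁ := (h r₂).mpr (by rcases hmem₂ with h' | h' <;> simp [h'])
      have h12 : r₁ ≤ r₂ := by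
        rcases List.mem_cons.mp hin₁ with h' | h'
        · exact h' ▸ hle₂
        · exact hub₂ r₁ h'
      have h21 : r₂ ≤ r₁ := by
        rcases List.mem_cons.mp hin₂ with h' | h'
        · exact h' ▸ hle₁
        · exact hub₁ r₂ h'
      simp only [List.foldl_cons, pvStep, hr₁, hr₂, le_antisymm h12 h21]

-- on a nondecreasing list the running max is the last element
theorem pvFold_pairwise_aux (t : List String) : ∀ (x : String),
    (x :: t).Pairwise (· ≤ ·) → t.foldl pvStep (some x) = (x :: t).getLast? := by
  induction t with
  | nil => intro x _; rfl
  | cons y t' ih =>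
    intro x hp
    have hxy : x ≤ y := (List.pairwise_cons.mp hp).1 y List.mem_cons_self
    have hp' : (y :: t').Pairwise (· ≤ ·) := (List.pairwise_cons.mp hp).2
    have hstep : pvStep (some x) y = some y := by
      by_cases h : x < y
      · simp [pvStep, h]
      · simp [pvStep, le_antisymm hxy (le_of_not_gt h)]
    calc (y :: t').foldl pvStep (some x)
        = t'.foldl pvStep (pvStep (some x) y) := by simp [List.foldl_cons]
      _ = t'.foldl pvStep (some y) := by rw [hstep]
      _ = (y :: t').getLast? := ih y hp'
      _ = (x :: y :: t').getLast? := by simp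

theorem pvFold_pairwise (l : List String) (h : l.Pairwise (· ≤ ·)) :
    l.foldl pvStep none = l.getLast? := by
  cases l with
  | nil => rfl
  | cons y t => exact pvFold_pairwise_aux t y h

-- B computes the running max of its candidate list
theorem pvB_eq (node : List (String × List (String × String))) :
    get_newest_timestamp_alt node = (pvCandsB node).foldl pvStep none := by
  have h1 : get_newest_timestamp_alt node =
      (if (PySem.List.sorted (pvCandsB node) (fun x => x) false).isEmpty then none
       else PySem.List.pyGet? (PySem.List.sorted (pvCandsB node) (fun x => x) false) (-1)) := rfl
  have h2 : ∀ (l : List String),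
      (if l.isEmpty then none else PySem.List.pyGet? l (-1)) = l.getLast? := by
    intro l; cases l <;> simp [PySem.List.pyGet?_neg_one]
  rw [h1, h2, ← pvFold_pairwise _ (PySem.List.sorted_pairwise (pvCandsB node) (fun x => x))]
  exact pvFold_mem_congr _ _ (fun x => PySem.List.mem_sorted (pvCandsB node) (fun y => y) false x)

-- first-match lookup = membership, when keys are distinct
theorem pvLookup_iff_mem {β : Type} (l : List (String × β)) (h : (l.map Prod.fst).Nodup)
    (k : String) (v : β) : l.lookup k = some v ↔ (k, v) ∈ l := by
  induction l with
  | nil => simp [List.lookup]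
  | cons p t ih =>
    obtain ⟨a, b⟩ := p
    have hnd : (t.map Prod.fst).Nodup := (List.nodup_cons.mp h).2
    have hna : a ∉ t.map Prod.fst := (List.nodup_cons.mp h).1
    by_cases hk : k = a
    · subst hk
      simp only [List.lookup, beq_self_eq_true, List.mem_cons]
      constructor
      · intro hb; exact Or.inl (by simpa using hb.symm)
      · intro hb
        rcases hb with h' | h'
        · simp [Prod.ext_iff] at h'; simp [h']
        · exact absurd (List.mem_map.mpr ⟨(k, v), h', rfl⟩) hna
    · have hb : (k == a) = false := beq_eq_false_iff_ne.mpr hk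
      simp only [List.lookup, hb, List.mem_cons]
      rw [ih hnd]
      constructor
      · exact Or.inr
      · intro h'
        rcases h' with h' | h'
        · exact absurd (congrArg Prod.fst h') hk
        · exact h'

theorem pvMem_candsOf (d : List (String × String)) (v : String) :
    v ∈ pvCandsOf d ↔ ∃ k ∈ pvTsKeys, d.lookup k = some v ∧ v ≠ "" := by
  have hopt : ∀ (o : Option String), v ∈ pvOptCand o ↔ o = some v ∧ v ≠ "" := by
    rintro (_ | s)
    · simp [pvOptCand]
    · by_cases hs : s = ""
      · subst hs
        constructor
        · intro h
          exact absurd h (by simp [pvOptCand])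
        · rintro ⟨h, hne⟩
          exact absurd (Option.some.inj h).symm hne
      · simp only [pvOptCand, if_neg hs, List.mem_singleton, Option.some.injEq]
        constructor
        · rintro rfl; exact ⟨rfl, hs⟩
        · rintro ⟨rfl, _⟩; rfl
  simp only [pvCandsOf, pvTsKeys, List.mem_append, hopt, List.mem_cons, List.not_mem_nil, or_false]
  constructor
  · rintro ((⟨h, hne⟩ | ⟨h, hne⟩) | ⟨h, hne⟩)
    · exact ⟨"modified", Or.inl rfl, h, hne⟩
    · exact ⟨"uploaded", Or.inr (Or.inl rfl), h, hne⟩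
    · exact ⟨"frozen", Or.inr (Or.inr rfl), h, hne⟩
  · rintro ⟨k, hk, h, hne⟩
    rcases hk with rfl | rfl | rfl
    · exact Or.inl (Or.inl ⟨h, hne⟩)
    · exact Or.inl (Or.inr ⟨h, hne⟩)
    · exact Or.inr ⟨h, hne⟩

theorem pvMem_candsA (node : List (String × List (String × String))) (v : String) :
    v ∈ pvCandsA node ↔
      ∃ c ∈ pvCtxs, ∃ d, node.lookup c = some d ∧ v ∈ pvCandsOf d := by
  simp only [pvCandsA, List.mem_flatMap]
  constructor
  · rintro ⟨c, hc, hv⟩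
    refine ⟨c, hc, ?_⟩
    unfold pvCtx at hv
    rcases hl : node.lookup c with _ | d
    · simp [hl] at hv
    · rw [hl] at hv
      by_cases he : d.isEmpty
      · simp [he] at hv
      · simp only [he, Bool.false_eq_true, if_false] at hv
        exact ⟨d, rfl, hv⟩
  · rintro ⟨c, hc, d, hl, hv⟩
    refine ⟨c, hc, ?_⟩
    unfold pvCtx
    rw [hl]
    have hd : ¬ d.isEmpty := by
      intro he
      rw [List.isEmpty_iff.mp he] at hv
      simp [pvCandsOf, pvOptCand, List.lookup] at hv
    simp only [hd, Bool.false_eq_true, if_false]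
    exact hv

theorem pvMem_candsB (node : List (String × List (String × String))) (v : String) :
    v ∈ pvCandsB node ↔
      ∃ p ∈ node, p.1 ∈ pvCtxs ∧ ∃ q ∈ p.2, q.1 ∈ pvTsKeys ∧ q.2 = v ∧ v ≠ "" := by
  have hq : ∀ (q : String × String),
      ((if pvTsKeys.contains q.1 && !(q.2 == "") then some q.2 else none) = some v)
      ↔ (q.1 ∈ pvTsKeys ∧ q.2 = v ∧ v ≠ "") := by
    intro q
    constructor
    · intro h
      by_cases hb : (pvTsKeys.contains q.1 && !(q.2 == "")) = true
      · rw [if_pos hb] at h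
        have hqv : q.2 = v := Option.some.inj h
        have hb' : q.1 ∈ pvTsKeys ∧ ¬(q.2 = "") := by
          simpa [List.contains_iff_mem] using hb
        subst hqv
        exact ⟨hb'.1, rfl, hb'.2⟩
      · rw [if_neg hb] at h; exact absurd h (by simp)
    · rintro ⟨h1, rfl, hne⟩
      have hb : (pvTsKeys.contains q.1 && !(q.2 == "")) = true := by
        simp [h1, hne]
      rw [if_pos hb]
  have hinner : ∀ (p : String × List (String × String)),
      (v ∈ (if pvCtxs.contains p.1 then
        p.2.filterMap (fun q => if pvTsKeys.contains q.1 && !(q.2 == "") then some q.2 else none)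
        else []))
      ↔ (p.1 ∈ pvCtxs ∧ ∃ q ∈ p.2, q.1 ∈ pvTsKeys ∧ q.2 = v ∧ v ≠ "") := by
    intro p
    by_cases hc : pvCtxs.contains p.1
    · rw [if_pos hc]
      simp only [List.mem_filterMap]
      constructor
      · rintro ⟨q, hmem, hval⟩
        exact ⟨List.contains_iff_mem.mp hc, q, hmem, (hq q).mp hval⟩
      · rintro ⟨-, q, hmem, hrest⟩
        exact ⟨q, hmem, (hq q).mpr hrest⟩
    · rw [if_neg hc]
      simp only [List.not_mem_nil, false_iff]
      rintro ⟨h1, -⟩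
      exact hc (List.contains_iff_mem.mpr h1)
  simp only [pvCandsB, List.mem_flatMap]
  constructor
  · rintro ⟨p, hp, hv⟩; exact ⟨p, hp, (hinner p).mp hv⟩
  · rintro ⟨p, hp, h⟩; exact ⟨p, hp, (hinner p).mpr h⟩

theorem pvMem_iff (node : List (String × List (String × String)))
    (hpre : Pre_get_newest_timestamp node) (v : String) :
    v ∈ pvCandsA node ↔ v ∈ pvCandsB node := by
  obtain ⟨hnodup, hdet⟩ := hpre
  rw [pvMem_candsA, pvMem_candsB]
  constructor
  · rintro ⟨c, hc, d, hl, hv⟩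
    have hmem : (c, d) ∈ node := (pvLookup_iff_mem node hnodup c d).mp hl
    obtain ⟨k, hk, hkl, hne⟩ := (pvMem_candsOf d v).mp hv
    have hqmem : (k, v) ∈ d := (pvLookup_iff_mem d (hdet (c, d) hmem) k v).mp hkl
    exact ⟨(c, d), hmem, hc, (k, v), hqmem, hk, rfl, hne⟩
  · rintro ⟨⟨c, d⟩, hp, hc, ⟨k, v'⟩, hq, ht, hqv, hne⟩
    dsimp only at hp hc hq ht hqv
    subst hqv
    refine ⟨c, hc, d, (pvLookup_iff_mem node hnodup c d).mpr hp, ?_⟩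
    exact (pvMem_candsOf d v').mpr ⟨k, ht, (pvLookup_iff_mem d (hdet (c, d) hp) k v').mpr hq, hne⟩

-- ===== VERDICT (by name: the statement is the Claim_ definition above) =====
theorem get_newest_timestamp_spec : Claim_equal_get_newest_timestamp := by
  intro node _ hpre
  unfold Spec_get_newest_timestamp
  rw [pvA_eq, pvB_eq, pvFold_mem_congr _ _ (pvMem_iff node hpre)]
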